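-- pv_equiv track=rewrite | github.com/vinitus/algorithm_problem | SWEA/1226_미로1/test1.py | Count_Zero
-- ===== SOURCE A (Python) =====
-- def Count_Zero(tmp_list):
--     count_zero = 0
--     zero = True
--     three = False
--     for i in tmp_list:
--         if (i == 0):
--             count_zero += 1
--         elif (i == 3):
--             three = True
--             break
--     if three:
--         return -1
--     else:
--         return count_zero
-- ===== SOURCE B (Python) =====
-- def Count_Zero(tmp_list):
--     if 3 in tmp_list:
--         return -1
--     return tmp_list.count(0)
-- ===== Notes on version B (the rewrite author's own statement) =====
-- stated objective: idiomatic
-- what changed: Replaces the fused early-exit loop with explicit accumulator and flags by two independent library scans: a membership test for 3 and list.count(0); no loop or mutable state.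
import Mathlib
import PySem

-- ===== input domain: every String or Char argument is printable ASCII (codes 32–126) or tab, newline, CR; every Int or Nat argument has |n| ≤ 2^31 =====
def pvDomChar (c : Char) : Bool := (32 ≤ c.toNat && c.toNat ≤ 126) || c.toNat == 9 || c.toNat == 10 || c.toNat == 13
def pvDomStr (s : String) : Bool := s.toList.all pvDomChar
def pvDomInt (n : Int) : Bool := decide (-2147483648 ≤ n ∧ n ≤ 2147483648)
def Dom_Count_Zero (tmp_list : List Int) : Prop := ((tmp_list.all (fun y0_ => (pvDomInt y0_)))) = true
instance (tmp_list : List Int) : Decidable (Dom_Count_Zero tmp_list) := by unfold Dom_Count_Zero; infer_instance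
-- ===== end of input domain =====

-- B replaces A's fused early-exit loop with two independent library scans (membership of 3, then count of 0) — idiomatic.

-- ===== PORT A =====
-- literal port of A's loop: state (count_zero, three), break on 3
def Count_Zero_loop (l : List Int) (count_zero : Int) : Int × Bool :=
  match l with
  | [] => (count_zero, false)
  | i :: rest =>
    if i = 0 then Count_Zero_loop rest (count_zero + 1)
    else if i = 3 then (count_zero, true)
    else Count_Zero_loop rest count_zero

def Count_Zero (tmp_list : List Int) : Int :=
  let r := Count_Zero_loop tmp_list 0
  if r.2 then -1 else r.1

-- ===== PORT B =====
def Count_Zero_alt (tmp_list : List Int) : Int :=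
  if tmp_list.contains 3 then -1 else (PySem.List.count tmp_list 0 : Int)

-- ===== PRECONDITION & SPEC =====
def Spec_Count_Zero (tmp_list : List Int) (out : Int) : Prop := out = Count_Zero_alt tmp_list
instance (tmp_list : List Int) (out : Int) : Decidable (Spec_Count_Zero tmp_list out) := by unfold Spec_Count_Zero; infer_instance

-- ===== CLAIM (what is proved, stated in full; the proofs are below) =====
def Claim_equal_Count_Zero : Prop := ∀ (tmp_list : List Int), Dom_Count_Zero tmp_list → Spec_Count_Zero tmp_list (Count_Zero tmp_list)

-- ===== LEMMAS AND PROOFS =====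
-- characterisation of A's loop: snd = membership of 3, and if no 3 then fst = acc + count of zeros
theorem Count_Zero_loop_char (l : List Int) (acc : Int) :
    (Count_Zero_loop l acc).2 = l.contains 3 ∧
    (l.contains 3 = false → (Count_Zero_loop l acc).1 = acc + (PySem.List.count l 0 : Int)) := by
  induction l generalizing acc with
  | nil => simp [Count_Zero_loop, PySem.List.count]
  | cons i rest ih =>
    by_cases h0 : i = 0
    · subst h0
      have := ih (acc + 1)
      simp [Count_Zero_loop, PySem.List.count] at *
      constructor
      · exact this.1
      · intro h; rw [this.2 h]; ring
    · by_cases h3 : i = 3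
      · subst h3; simp [Count_Zero_loop]
      · have := ih acc
        simp [Count_Zero_loop, h0, h3, PySem.List.count, Ne.symm h3] at *
        exact this

-- ===== VERDICT (by name: the statement is the Claim_ definition above) =====
theorem Count_Zero_spec : Claim_equal_Count_Zero := by
  intro l _
  unfold Spec_Count_Zero Count_Zero Count_Zero_alt
  obtain ⟨h2, h1⟩ := Count_Zero_loop_char l 0
  by_cases h : (3 : Int) ∈ l
  · simp [h2, h]
  · have hc : l.contains 3 = false := by simp [h]
    simp [h2, h, h1 hc]
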